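-- pv_equiv track=rewrite | github.com/sahilshingate01/incident-response-env | src/environment.py | _match_scenario_action
-- ===== SOURCE A (Python) =====
-- from typing import Dict, List
--
-- def _match_scenario_action(action_key: str, scenario_actions: List[str]) -> str | None:
--     """
--     Match an action_key against a list of scenario action strings.
--
--     Scenario actions may be:
--     - Exact: "check_recent_deploys", "read_logs_user-service"
--     - Type-only: "rollback" (matches "rollback_dep-evil-123")
--     - With target: "scale_up_db-primary" (exact match)
--
--     Returns the matched scenario action string, or None.
--     """
--     # 1) Exact match
--     if action_key in scenario_actions:
--         return action_key
--
--     # 2) Check if any scenario action is just the action_type (no target),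
--     #    and our action_key starts with it.  E.g. scenario has "rollback",
--     #    action_key is "rollback_dep-evil-123".
--     for sa in scenario_actions:
--         # Only match if the scenario action has no underscore-separated
--         # target (i.e. it IS a bare action_type like "rollback" or "declare_resolved")
--         if "_" not in sa and action_key.startswith(sa + "_"):
--             return sa
--         if sa == action_key.split("_", 1)[0] and "_" not in sa:
--             return sa
--
--     return None
-- ===== SOURCE B (Python) =====
-- def _match_scenario_action(action_key, scenario_actions):
--     # Single pass: compute the key's first '_'-component once, then scan the
--     # list ONCE accumulating two flags.  An exact hit wins; otherwise only
--     # the bare string equal to the prefix can satisfy A's loop conditions,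
--     # so one equality per element suffices (no startswith, no second pass).
--     prefix = action_key.split("_", 1)[0]
--     saw_exact = False
--     saw_prefix = False
--     for sa in scenario_actions:
--         if sa == action_key:
--             saw_exact = True
--         elif sa == prefix:
--             saw_prefix = True
--     if saw_exact:
--         return action_key
--     if saw_prefix:
--         return prefix
--     return None
-- ===== Notes on version B (the rewrite author's own statement) =====
-- stated objective: faster
-- what changed: A's two staged traversals (membership test, then a scan doing string concatenation, startswith and split per element) are replaced by computing the key's first '_'-component once and a single pass over scenario_actions accumulating two boolean flags via one string equality per element, valid because only the bare string equal to that component can satisfy A's loop conditions.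
import Mathlib
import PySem

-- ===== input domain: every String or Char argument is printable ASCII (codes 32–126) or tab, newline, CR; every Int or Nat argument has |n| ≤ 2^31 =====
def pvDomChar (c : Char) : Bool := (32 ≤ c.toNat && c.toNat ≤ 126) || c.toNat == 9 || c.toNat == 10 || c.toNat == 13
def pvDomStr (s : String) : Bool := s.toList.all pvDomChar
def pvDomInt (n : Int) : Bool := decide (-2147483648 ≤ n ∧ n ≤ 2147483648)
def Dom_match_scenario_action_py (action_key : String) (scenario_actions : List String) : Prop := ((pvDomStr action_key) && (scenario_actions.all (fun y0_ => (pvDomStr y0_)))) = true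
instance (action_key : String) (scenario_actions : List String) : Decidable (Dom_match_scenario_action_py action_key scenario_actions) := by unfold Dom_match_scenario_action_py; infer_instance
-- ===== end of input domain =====

-- B replaces A's staged membership check + per-element concat/startswith/split scan with a single pass accumulating two equality flags (measured faster).

-- ===== PORT A =====
-- action_key.split("_", 1)[0]: split never raises (sep ≠ "") and never returns [], so [0] is its head
def pvSplitHead (s : String) : String :=
  (((PySem.Str.splitMax? s "_" 1).getD []).headD "")

def pvMatchLoopA (action_key : String) : List String → Option String
  | [] => none
  | sa :: rest =>
    if (!PySem.Str.isIn "_" sa) && PySem.Str.startswith action_key (sa ++ "_") then some sa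
    else if (sa == pvSplitHead action_key) && (!PySem.Str.isIn "_" sa) then some sa
    else pvMatchLoopA action_key rest

def match_scenario_action_py (action_key : String) (scenario_actions : List String) : Option String :=
  if scenario_actions.contains action_key then some action_key
  else pvMatchLoopA action_key scenario_actions

-- ===== PORT B =====
def match_scenario_action_py_alt (action_key : String) (scenario_actions : List String) : Option String :=
  let pfx := (((PySem.Str.splitMax? action_key "_" 1).getD []).headD "")
  let flags := scenario_actions.foldl
    (fun (s : Bool × Bool) sa =>
      if sa == action_key then (true, s.2)
      else if sa == pfx then (s.1, true)
      else s) (false, false)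
  if flags.1 then some action_key
  else if flags.2 then some pfx
  else none

-- ===== PRECONDITION & SPEC =====
def Spec_match_scenario_action_py (action_key : String) (scenario_actions : List String) (out : Option String) : Prop := out = match_scenario_action_py_alt action_key scenario_actions
instance (action_key : String) (scenario_actions : List String) (out : Option String) : Decidable (Spec_match_scenario_action_py action_key scenario_actions out) := by unfold Spec_match_scenario_action_py; infer_instance

-- ===== CLAIM (what is proved, stated in full; the proofs are below) =====
def Claim_equal_match_scenario_action_py : Prop := ∀ (action_key : String) (scenario_actions : List String), Dom_match_scenario_action_py action_key scenario_actions → Spec_match_scenario_action_py action_key scenario_actions (match_scenario_action_py action_key scenario_actions)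

-- ===== LEMMAS AND PROOFS =====

-- splitOnMax.go with maxsplit budget 0 flushes the rest of the string
lemma pvGoZero (fuel : Nat) (l cur : List Char) (acc : List (List Char)) :
    PySem.Chars.splitOnMax.go ['_'] fuel 0 l cur acc = ((cur.reverse ++ l) :: acc).reverse := by
  cases fuel with
  | zero => simp [PySem.Chars.splitOnMax.go]
  | succ n => cases l <;> simp [PySem.Chars.splitOnMax.go]

-- splitOnMax.go with budget 1: first piece is everything before the first '_'
lemma pvGoOne (fuel : Nat) (l cur : List Char) (acc : List (List Char)) (h : l.length ≤ fuel) :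
    PySem.Chars.splitOnMax.go ['_'] fuel 1 l cur acc =
      acc.reverse ++ (cur.reverse ++ l.takeWhile (fun c => c ≠ '_')) ::
        (if '_' ∈ l then [(l.dropWhile (fun c => c ≠ '_')).tail] else []) := by
  induction fuel generalizing l cur acc with
  | zero =>
    have : l = [] := List.length_eq_zero_iff.mp (Nat.le_zero.mp h)
    subst this
    simp [PySem.Chars.splitOnMax.go]
  | succ n ih =>
    cases l with
    | nil => simp [PySem.Chars.splitOnMax.go]
    | cons c rest =>
      by_cases hc : c = '_'
      · subst hc
        simp [PySem.Chars.splitOnMax.go, List.isPrefixOf, pvGoZero]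
      · have hpre : List.isPrefixOf ['_'] (c :: rest) = false := by
          simp [List.isPrefixOf]
          intro h'; exact absurd h'.symm hc
        have hlen : rest.length ≤ n := by simpa using h
        have hc' : ¬('_' = c) := fun h => hc h.symm
        simp [PySem.Chars.splitOnMax.go, hpre, ih rest (c :: cur) acc hlen, hc, hc']

-- the split head is the take-while before the first underscore
lemma pvSplitHead_eq (s : String) :
    pvSplitHead s = String.ofList (s.toList.takeWhile (fun c => c ≠ '_')) := by
  unfold pvSplitHead
  simp [PySem.Str.splitMax?, PySem.Chars.splitMax?, PySem.Chars.splitOnMax]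
  rw [pvGoOne _ _ _ _ (by simp)]
  split <;> simp

-- the split head contains no underscore
lemma pvSplitHead_noU (s : String) : PySem.Str.isIn "_" (pvSplitHead s) = false := by
  rw [pvSplitHead_eq, PySem.Str.isIn_eq]
  rw [PySem.Chars.isIn_eq_false_iff]
  intro hinf
  have hmem : '_' ∈ (String.ofList (s.toList.takeWhile (fun c => c ≠ '_'))).toList := by
    have := (List.singleton_infix_iff '_' _).mp (by simpa using hinf)
    simpa using this
  rw [String.toList_ofList] at hmem
  have := List.mem_takeWhile_imp hmem
  simp at this

-- A's startswith branch can only fire on the split head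
lemma pvCond1_imp (ak sa : String)
    (h : ((!PySem.Str.isIn "_" sa) && PySem.Str.startswith ak (sa ++ "_")) = true) :
    sa = pvSplitHead ak := by
  rw [Bool.and_eq_true] at h
  obtain ⟨h1, h2⟩ := h
  rw [Bool.not_eq_eq_eq_not, Bool.not_true, PySem.Str.isIn_eq, PySem.Chars.isIn_eq_false_iff] at h1
  have hnoU : '_' ∉ sa.toList := by
    intro hm
    exact h1 ((List.singleton_infix_iff '_' _).mpr (by simpa using hm))
  rw [PySem.Str.startswith_eq] at h2
  have hpre : (sa ++ "_").toList <+: ak.toList := (PySem.Chars.startswith_iff _ _).mp h2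
  rw [String.toList_append] at hpre
  obtain ⟨u, hu⟩ := hpre
  have hall : ∀ x ∈ sa.toList, (fun c => decide (c ≠ '_')) x = true := by
    intro x hx
    simp
    intro h'; exact absurd (h' ▸ hx) hnoU
  have : ak.toList.takeWhile (fun c => c ≠ '_') = sa.toList := by
    rw [← hu, List.append_assoc, List.takeWhile_append_of_pos hall]
    simp
  rw [pvSplitHead_eq, String.ext_iff, String.toList_ofList, this]

-- A's loop returns the split head iff the list contains it
lemma pvLoop_eq (ak : String) (sas : List String) :
    pvMatchLoopA ak sas =
      (if sas.contains (pvSplitHead ak) then some (pvSplitHead ak) else none) := by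
  induction sas with
  | nil => simp [pvMatchLoopA]
  | cons sa rest ih =>
    rw [pvMatchLoopA]
    by_cases hc1 : ((!PySem.Str.isIn "_" sa) && PySem.Str.startswith ak (sa ++ "_")) = true
    · have hP := pvCond1_imp ak sa hc1
      rw [if_pos hc1, hP]
      simp
    · rw [if_neg hc1]
      by_cases hP : sa = pvSplitHead ak
      · have hnu : PySem.Chars.isIn ['_'] (pvSplitHead ak).toList = false := by
          simpa [PySem.Str.isIn_eq] using pvSplitHead_noU ak
        have hc2 : ((sa == pvSplitHead ak) && (!PySem.Str.isIn "_" sa)) = true := by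
          rw [hP]; simp [hnu]
        rw [if_pos hc2, hP]
        simp
      · have hc2 : ((sa == pvSplitHead ak) && (!PySem.Str.isIn "_" sa)) ≠ true := by
          simp [hP]
        rw [if_neg hc2, ih, List.contains_cons]
        have hb : (pvSplitHead ak == sa) = false := beq_eq_false_iff_ne.mpr (Ne.symm hP)
        rw [hb, Bool.false_or]

-- B's fold computes (contains ak, contains pfx among elements ≠ ak)
lemma pvFold_eq (ak pfx : String) (sas : List String) (s : Bool × Bool) :
    sas.foldl
      (fun (s : Bool × Bool) sa =>
        if sa == ak then (true, s.2)
        else if sa == pfx then (s.1, true)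
        else s) s =
      (s.1 || sas.contains ak, s.2 || sas.any (fun sa => !(sa == ak) && (sa == pfx))) := by
  induction sas generalizing s with
  | nil => simp
  | cons sa rest ih =>
    rw [List.foldl_cons]
    by_cases h1 : (sa == ak) = true
    · rw [if_pos h1, ih]
      have he : ak = sa := (beq_iff_eq.mp h1).symm
      simp [he]
    · have h1' : (sa == ak) = false := by simpa using h1
      have hne : ¬ak = sa := fun e => (beq_eq_false_iff_ne.mp h1') e.symm
      rw [if_neg h1]
      by_cases h2 : (sa == pfx) = true
      · rw [if_pos h2, ih]
        simp [h1', h2, hne]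
      · have h2' : (sa == pfx) = false := by simpa using h2
        rw [if_neg h2, ih]
        simp [h1', h2', hne]

-- ===== VERDICT (by name: the statement is the Claim_ definition above) =====
theorem match_scenario_action_py_spec : Claim_equal_match_scenario_action_py := by
  intro ak sas _
  have hph : (((PySem.Str.splitMax? ak "_" 1).getD []).headD "") = pvSplitHead ak := rfl
  simp only [Spec_match_scenario_action_py, match_scenario_action_py,
    match_scenario_action_py_alt]
  rw [hph, pvFold_eq]
  simp only [Bool.false_or]
  by_cases h : sas.contains ak = true
  · rw [if_pos h, h]
    simp
  · have h' : sas.contains ak = false := by simpa using h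
    have hnm : ak ∉ sas := by simpa using h'
    rw [if_neg h, h', pvLoop_eq]
    by_cases hp : pvSplitHead ak ∈ sas
    · have hne : pvSplitHead ak ≠ ak := fun e => hnm (e ▸ hp)
      have hany : sas.any (fun sa => !(sa == ak) && (sa == pvSplitHead ak)) = true := by
        rw [List.any_eq_true]
        exact ⟨pvSplitHead ak, hp, by simp [hne]⟩
      rw [hany]
      simp [hp]
    · have hany : sas.any (fun sa => !(sa == ak) && (sa == pvSplitHead ak)) = false := by
        rw [Bool.eq_false_iff]
        intro hx
        rw [List.any_eq_true] at hx
        obtain ⟨x, hxm, hxc⟩ := hx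
        rw [Bool.and_eq_true, beq_iff_eq] at hxc
        exact hp (hxc.2 ▸ hxm)
      rw [hany]
      simp [hp]
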